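-- pv_equiv track=rewrite | github.com/EmilJaffal/CAF-SAF-gui | web_app.py | _choose_preferred_xlsx_file
-- ===== SOURCE A (Python) =====
-- def _choose_preferred_xlsx_file(file_names: list[str], preferred_suffixes: list[str]):
--     if not file_names:
--         return None
--
--     lowered = [f.lower() for f in file_names]
--     for suffix in preferred_suffixes:
--         suffix_lower = suffix.lower()
--         for idx, name in enumerate(lowered):
--             if name.endswith(suffix_lower):
--                 return file_names[idx]
--
--     return file_names[0]
-- ===== SOURCE B (Python) =====
-- def _choose_preferred_xlsx_file(file_names: list[str], preferred_suffixes: list[str]):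
--     if not file_names:
--         return None
--     sufs = [s.lower() for s in preferred_suffixes]
--
--     def rank(name):
--         low = name.lower()
--         j = 0
--         for s in sufs:
--             if low.endswith(s):
--                 return j
--             j += 1
--         return j  # = len(sufs): no suffix matched
--
--     best = 0
--     best_rank = rank(file_names[0])
--     i = 1
--     for f in file_names[1:]:
--         r = rank(f)
--         if r < best_rank:
--             best = i
--             best_rank = r
--         i += 1
--     return file_names[best]
-- ===== Notes on version B (the rewrite author's own statement) =====
-- stated objective: alternative
-- what changed: Replaced the suffix-outer/file-inner nested early-return scan by a single file-outer argmin: each file gets a rank (index of first matching preferred suffix, len(preferred_suffixes) if none) and the earliest file with minimal rank is returned, with the empty-list guard kept.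
import Mathlib
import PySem

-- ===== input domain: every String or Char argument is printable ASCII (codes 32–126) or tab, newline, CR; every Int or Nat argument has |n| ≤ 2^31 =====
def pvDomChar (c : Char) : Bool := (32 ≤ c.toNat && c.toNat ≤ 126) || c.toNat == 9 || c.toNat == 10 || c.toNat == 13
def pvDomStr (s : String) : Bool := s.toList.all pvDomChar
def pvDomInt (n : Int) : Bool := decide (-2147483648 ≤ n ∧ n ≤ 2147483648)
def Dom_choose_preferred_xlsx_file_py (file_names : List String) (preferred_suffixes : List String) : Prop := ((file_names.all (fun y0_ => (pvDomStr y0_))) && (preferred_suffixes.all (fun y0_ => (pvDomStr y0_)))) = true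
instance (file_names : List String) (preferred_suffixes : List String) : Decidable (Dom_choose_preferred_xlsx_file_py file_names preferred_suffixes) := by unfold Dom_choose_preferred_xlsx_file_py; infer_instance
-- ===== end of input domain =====

-- B replaces A's suffix-outer nested early-return scan by a file-outer argmin over per-file
-- suffix ranks (objective: alternative decomposition, same cost).

-- ===== PORT A =====
-- inner 'for idx, name in enumerate(lowered): if name.endswith(suffix_lower): return file_names[idx]'
def pvA_inner (lowered : List String) (suffix_lower : String) (idx : Nat) : Option Nat :=
  match lowered with
  | [] => none
  | name :: rest =>
    if PySem.Str.endswith name suffix_lower then some idx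
    else pvA_inner rest suffix_lower (idx + 1)

-- outer 'for suffix in preferred_suffixes: …' returning the index found (none = fell through)
def pvA_outer (suffixes : List String) (lowered : List String) : Option Nat :=
  match suffixes with
  | [] => none
  | suffix :: rest =>
    match pvA_inner lowered (PySem.Str.lower suffix) 0 with
    | some idx => some idx
    | none => pvA_outer rest lowered

def choose_preferred_xlsx_file_py (file_names : List String) (preferred_suffixes : List String) : Option String :=
  if file_names = [] then none
  else
    let lowered := file_names.map (fun f => PySem.Str.lower f)
    match pvA_outer preferred_suffixes lowered with
    | some idx => PySem.List.pyGet? file_names (idx : Int)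
    | none => PySem.List.pyGet? file_names (0 : Int)

-- ===== PORT B =====
-- rank(name): index of first suffix in sufs the lowered name ends with, len(sufs) if none
def pvB_rankAux (sufs : List String) (low : String) (j : Nat) : Nat :=
  match sufs with
  | [] => j
  | s :: rest => if PySem.Str.endswith low s then j else pvB_rankAux rest low (j + 1)

-- the best-tracking loop 'for f in file_names[1:]'
def pvB_best (sufs : List String) (fs : List String) (i best bestRank : Nat) : Nat :=
  match fs with
  | [] => best
  | f :: rest =>
    let r := pvB_rankAux sufs (PySem.Str.lower f) 0
    if r < bestRank then pvB_best sufs rest (i + 1) i r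
    else pvB_best sufs rest (i + 1) best bestRank

def choose_preferred_xlsx_file_py_alt (file_names : List String) (preferred_suffixes : List String) : Option String :=
  match file_names with
  | [] => none
  | f0 :: rest =>
    let sufs := preferred_suffixes.map (fun s => PySem.Str.lower s)
    let best := pvB_best sufs rest 1 0 (pvB_rankAux sufs (PySem.Str.lower f0) 0)
    PySem.List.pyGet? (f0 :: rest) (best : Int)

-- ===== PRECONDITION & SPEC =====
def Spec_choose_preferred_xlsx_file_py (file_names : List String) (preferred_suffixes : List String) (out : Option String) : Prop := out = choose_preferred_xlsx_file_py_alt file_names preferred_suffixes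
instance (file_names : List String) (preferred_suffixes : List String) (out : Option String) : Decidable (Spec_choose_preferred_xlsx_file_py file_names preferred_suffixes out) := by unfold Spec_choose_preferred_xlsx_file_py; infer_instance

-- ===== CLAIM (what is proved, stated in full; the proofs are below) =====
def Claim_equal_choose_preferred_xlsx_file_py : Prop := ∀ (file_names : List String) (preferred_suffixes : List String), Dom_choose_preferred_xlsx_file_py file_names preferred_suffixes → Spec_choose_preferred_xlsx_file_py file_names preferred_suffixes (choose_preferred_xlsx_file_py file_names preferred_suffixes)

-- ===== LEMMAS AND PROOFS =====

-- mathematical rank of a (lowered) name w.r.t. a (lowered) suffix list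
def pvRk (sufs : List String) (low : String) : Nat :=
  match sufs with
  | [] => 0
  | s :: rest => if PySem.Str.endswith low s then 0 else pvRk rest low + 1

-- index of the first minimum of a list of ranks (0 for [])
def pvFam (rs : List Nat) : Nat :=
  match rs with
  | [] => 0
  | r :: rest => if rest.all (fun x => decide (r ≤ x)) then 0 else pvFam rest + 1

theorem pvB_rankAux_eq (sufs : List String) (low : String) (j : Nat) :
    pvB_rankAux sufs low j = j + pvRk sufs low := by
  induction sufs generalizing j with
  | nil => simp [pvB_rankAux, pvRk]
  | cons s rest ih =>
    rw [pvB_rankAux, pvRk]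
    cases he : PySem.Str.endswith low s
    · rw [if_neg (fun hc => Bool.false_ne_true hc),
        if_neg (fun hc => Bool.false_ne_true hc), ih]
      omega
    · rw [if_pos rfl, if_pos rfl]
      omega

theorem pvFam_map_succ (rs : List Nat) :
    pvFam (rs.map (fun r => r + 1)) = pvFam rs := by
  induction rs with
  | nil => rfl
  | cons r rest ih =>
    simp only [List.map_cons, pvFam, List.all_map, ih]
    congr 1
    simp

theorem pvFam_const_zero (rs : List Nat) (h : ∀ r ∈ rs, r = 0) : pvFam rs = 0 := by
  cases rs with
  | nil => rfl
  | cons r rest =>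
    rw [pvFam, if_pos]
    simp only [List.all_eq_true, decide_eq_true_eq]
    intro x hx
    rw [h r (by simp), h x (by simp [hx])]

theorem pvFam_first_zero (as bs : List Nat) (h : ∀ a ∈ as, 0 < a) :
    pvFam (as ++ 0 :: bs) = as.length := by
  induction as with
  | nil => simp [pvFam]
  | cons a rest ih =>
    rw [List.cons_append, pvFam, if_neg]
    · rw [ih (fun x hx => h x (by simp [hx]))]; simp
    · simp only [List.all_eq_true, decide_eq_true_eq, not_forall]
      refine ⟨0, by simp, ?_⟩
      have := h a (by simp); omega

theorem pvA_inner_some (lowered : List String) (s : String) (j i : Nat)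
    (h : pvA_inner lowered s j = some i) :
    ∃ xs n ys, lowered = xs ++ n :: ys ∧ i = j + xs.length ∧
      (∀ x ∈ xs, PySem.Str.endswith x s = false) ∧ PySem.Str.endswith n s = true := by
  induction lowered generalizing j with
  | nil => simp [pvA_inner] at h
  | cons name rest ih =>
    rw [pvA_inner] at h
    cases he : PySem.Str.endswith name s
    · rw [if_neg (fun hc => Bool.false_ne_true (he ▸ hc))] at h
      obtain ⟨xs, n, ys, h1, h2, h3, h4⟩ := ih (j + 1) h
      refine ⟨name :: xs, n, ys, by simp [h1], by simp [h2]; omega, ?_, h4⟩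
      intro x hx
      rcases List.mem_cons.mp hx with rfl | hx
      · exact he
      · exact h3 x hx
    · rw [if_pos he] at h
      injection h with h'
      exact ⟨[], name, rest, by simp, by simp [← h'], by simp, he⟩

theorem pvA_inner_none (lowered : List String) (s : String) (j : Nat)
    (h : pvA_inner lowered s j = none) :
    ∀ n ∈ lowered, PySem.Str.endswith n s = false := by
  induction lowered generalizing j with
  | nil => simp
  | cons name rest ih =>
    rw [pvA_inner] at h
    cases he : PySem.Str.endswith name s
    · rw [if_neg (fun hc => Bool.false_ne_true (he ▸ hc))] at h
      intro n hn
      rcases List.mem_cons.mp hn with rfl | hn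
      · exact he
      · exact ih (j + 1) h n hn
    · rw [if_pos he] at h
      exact absurd h (by simp)

-- A's chosen index (with the fall-through to index 0) is the first argmin of the ranks
theorem pvA_main (ss lowered : List String) :
    (match pvA_outer ss lowered with | some i => i | none => 0) =
      pvFam (lowered.map (pvRk (ss.map (fun s => PySem.Str.lower s)))) := by
  induction ss with
  | nil =>
    rw [pvA_outer, pvFam_const_zero]
    intro r hr
    simp only [List.mem_map] at hr
    obtain ⟨x, _, hx⟩ := hr
    simp only [List.map_nil, pvRk] at hx
    omega
  | cons s rest ih =>
    rw [pvA_outer]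
    cases hinner : pvA_inner lowered (PySem.Str.lower s) 0 with
    | some i =>
      obtain ⟨xs, n, ys, h1, h2, h3, h4⟩ := pvA_inner_some _ _ _ _ hinner
      subst h1
      simp only [List.map_cons, List.map_append]
      have hn : pvRk (PySem.Str.lower s :: List.map (fun s => PySem.Str.lower s) rest) n = 0 := by
        rw [pvRk, if_pos h4]
      rw [hn, pvFam_first_zero]
      · simpa using h2
      · intro a ha
        simp only [List.mem_map] at ha
        obtain ⟨x, hx, hax⟩ := ha
        rw [pvRk,
          if_neg (fun hc => Bool.false_ne_true ((h3 x hx) ▸ hc))] at hax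
        omega
    | none =>
      have hall := pvA_inner_none _ _ _ hinner
      have hmap : lowered.map (pvRk ((s :: rest).map (fun s => PySem.Str.lower s))) =
          (lowered.map (pvRk (rest.map (fun s => PySem.Str.lower s)))).map (fun r => r + 1) := by
        rw [List.map_map]
        apply List.map_congr_left
        intro x hx
        simp only [Function.comp_apply, List.map_cons, pvRk,
          if_neg (fun hc => Bool.false_ne_true ((hall x hx) ▸ hc))]
      rw [hmap, pvFam_map_succ, ← ih]

-- B's best-tracking loop computes the first argmin of (accumulated best, ranks of the rest)
theorem pvB_best_spec (sufs fs : List String) (i best bestRank : Nat) :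
    pvB_best sufs fs i best bestRank =
      if (fs.map (fun f => pvRk sufs (PySem.Str.lower f))).all (fun r => decide (bestRank ≤ r))
      then best
      else i + pvFam (fs.map (fun f => pvRk sufs (PySem.Str.lower f))) := by
  induction fs generalizing i best bestRank with
  | nil => simp [pvB_best]
  | cons f rest ih =>
    rw [pvB_best]
    simp only [pvB_rankAux_eq, Nat.zero_add, List.map_cons, List.all_cons, pvFam]
    by_cases hlt : pvRk sufs (PySem.Str.lower f) < bestRank
    · rw [if_pos hlt, ih]
      have hc1 : decide (bestRank ≤ pvRk sufs (PySem.Str.lower f)) = false := by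
        simp only [decide_eq_false_iff_not, not_le]; exact hlt
      rw [hc1, Bool.false_and]
      cases h3 : ((List.map (fun f => pvRk sufs (PySem.Str.lower f)) rest).all
          fun x => decide (pvRk sufs (PySem.Str.lower f) ≤ x))
      · rw [if_neg (fun hc => Bool.false_ne_true hc),
          if_neg (fun hc => Bool.false_ne_true hc),
          if_neg (fun hc => Bool.false_ne_true hc)]
        omega
      · rw [if_pos rfl, if_neg (fun hc => Bool.false_ne_true hc), if_pos rfl]
        omega
    · rw [if_neg hlt, ih]
      have hc1 : decide (bestRank ≤ pvRk sufs (PySem.Str.lower f)) = true := by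
        simp only [decide_eq_true_eq]; omega
      rw [hc1, Bool.true_and]
      cases h2 : ((List.map (fun f => pvRk sufs (PySem.Str.lower f)) rest).all
          fun x => decide (bestRank ≤ x))
      · rw [List.all_eq_false] at h2
        obtain ⟨x, hx, hxf⟩ := h2
        have hxlt : x < bestRank := by simpa using hxf
        have h3 : ((List.map (fun f => pvRk sufs (PySem.Str.lower f)) rest).all
            fun x => decide (pvRk sufs (PySem.Str.lower f) ≤ x)) = false := by
          rw [List.all_eq_false]
          refine ⟨x, hx, ?_⟩
          simp only [decide_eq_true_eq, not_le]
          omega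
        rw [h3, if_neg (fun hc => Bool.false_ne_true hc),
          if_neg (fun hc => Bool.false_ne_true hc),
          if_neg (fun hc => Bool.false_ne_true hc)]
        omega
      · rw [if_pos rfl, if_pos rfl]

-- ===== VERDICT (by name: the statement is the Claim_ definition above) =====
theorem choose_preferred_xlsx_file_py_spec : Claim_equal_choose_preferred_xlsx_file_py := by
  intro file_names preferred_suffixes _
  unfold Spec_choose_preferred_xlsx_file_py
  cases file_names with
  | nil => rfl
  | cons f0 rest =>
    show (match pvA_outer preferred_suffixes ((f0 :: rest).map (fun f => PySem.Str.lower f)) with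
          | some idx => PySem.List.pyGet? (f0 :: rest) (idx : Int)
          | none => PySem.List.pyGet? (f0 :: rest) (0 : Int)) = _
    have hA : (match pvA_outer preferred_suffixes ((f0 :: rest).map (fun f => PySem.Str.lower f)) with
          | some idx => PySem.List.pyGet? (f0 :: rest) (idx : Int)
          | none => PySem.List.pyGet? (f0 :: rest) (0 : Int)) =
        PySem.List.pyGet? (f0 :: rest)
          ((match pvA_outer preferred_suffixes ((f0 :: rest).map (fun f => PySem.Str.lower f)) with
            | some i => i | none => 0 : Nat) : Int) := by
      cases pvA_outer preferred_suffixes ((f0 :: rest).map (fun f => PySem.Str.lower f)) <;> rfl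
    rw [hA, pvA_main]
    show _ = PySem.List.pyGet? (f0 :: rest)
        ((pvB_best (preferred_suffixes.map (fun s => PySem.Str.lower s)) rest 1 0
          (pvB_rankAux (preferred_suffixes.map (fun s => PySem.Str.lower s)) (PySem.Str.lower f0) 0) : Nat) : Int)
    have hidx : pvFam (((f0 :: rest).map (fun f => PySem.Str.lower f)).map
          (pvRk (preferred_suffixes.map (fun s => PySem.Str.lower s)))) =
        pvB_best (preferred_suffixes.map (fun s => PySem.Str.lower s)) rest 1 0
          (pvB_rankAux (preferred_suffixes.map (fun s => PySem.Str.lower s)) (PySem.Str.lower f0) 0) := by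
      rw [pvB_best_spec, pvB_rankAux_eq, Nat.zero_add]
      simp only [List.map_cons, List.map_map, Function.comp_def, pvFam]
      split
      · rfl
      · omega
    rw [hidx]
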